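-- pv_equiv track=rewrite | github.com/eskibars/seed-money | models/bracket.py | get_round
-- ===== SOURCE A (Python) =====
-- def get_round(game_slot: int) -> int:
--     """Get the round number (1-6) for a game slot.
--
--     Round 6 = championship (slot 1)
--     Round 5 = Final Four (slots 2-3)
--     Round 4 = Elite Eight (slots 4-7)
--     Round 3 = Sweet 16 (slots 8-15)
--     Round 2 = Round of 32 (slots 16-31)
--     Round 1 = Round of 64 (slots 32-63)
--     """
--     if game_slot < 1 or game_slot > 63:
--         raise ValueError(f"Invalid game slot: {game_slot}")
--     r = 0
--     s = game_slot
--     while s >= 1: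
--         r += 1
--         s //= 2
--     # r is now the depth from root +1. Invert: round = 7 - depth
--     return 7 - r
-- ===== SOURCE B (Python) =====
-- def get_round(game_slot: int) -> int:
--     """Get the round number (1-6) for a game slot."""
--     if game_slot < 1 or game_slot > 63:
--         raise ValueError(f"Invalid game slot: {game_slot}")
--     return 7 - game_slot.bit_length()
-- ===== Notes on version B (the rewrite author's own statement) =====
-- stated objective: idiomatic
-- what changed: The halving while-loop counting the depth is replaced by the closed form 7 - game_slot.bit_length().
import Mathlib
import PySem

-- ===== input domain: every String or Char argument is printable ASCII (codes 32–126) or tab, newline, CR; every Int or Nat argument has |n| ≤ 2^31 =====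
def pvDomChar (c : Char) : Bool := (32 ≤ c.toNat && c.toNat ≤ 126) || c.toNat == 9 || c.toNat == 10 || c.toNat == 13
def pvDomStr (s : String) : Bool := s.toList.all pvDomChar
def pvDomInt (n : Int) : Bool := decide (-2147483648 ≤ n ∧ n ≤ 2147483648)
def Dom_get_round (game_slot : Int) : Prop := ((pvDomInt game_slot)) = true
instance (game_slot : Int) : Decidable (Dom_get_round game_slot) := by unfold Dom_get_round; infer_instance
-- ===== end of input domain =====

-- B replaces A's halving while-loop by the closed form 7 - bit_length (idiomatic).

-- ===== PORT A =====
-- while s >= 1: r += 1; s //= 2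
def get_round_loop (r s : Int) : Int :=
  if _h : s ≥ 1 then get_round_loop (r + 1) (PySem.Int.floordiv s 2) else r
termination_by s.toNat
decreasing_by
  have : PySem.Int.floordiv s 2 = s / 2 := PySem.Int.floordiv_eq_ediv_of_pos (by omega)
  rw [this]; omega

def get_round (game_slot : Int) : Int := 7 - get_round_loop 0 game_slot

-- ===== PORT B =====
def get_round_alt (game_slot : Int) : Int := 7 - (PySem.Int.bitLength game_slot : Int)

-- ===== PRECONDITION & SPEC =====
-- A raises ValueError for game_slot < 1 or > 63; exactly those inputs are excluded.
def Pre_get_round (game_slot : Int) : Prop := 1 ≤ game_slot ∧ game_slot ≤ 63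
instance (game_slot : Int) : Decidable (Pre_get_round game_slot) := by unfold Pre_get_round; infer_instance
def pvWitness_get_round : Int := (32)
def Spec_get_round (game_slot : Int) (out : Int) : Prop := out = get_round_alt game_slot
instance (game_slot : Int) (out : Int) : Decidable (Spec_get_round game_slot out) := by unfold Spec_get_round; infer_instance

-- ===== CLAIM (what is proved, stated in full; the proofs are below) =====
def Claim_equal_get_round : Prop := ∀ (game_slot : Int), Dom_get_round game_slot → Pre_get_round game_slot → Spec_get_round game_slot (get_round game_slot)

-- ===== LEMMAS AND PROOFS =====

-- ===== VERDICT (by name: the statement is the Claim_ definition above) =====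
theorem get_round_spec : Claim_equal_get_round := by
  intro g _ hp
  obtain ⟨h1, h2⟩ := hp
  unfold Spec_get_round
  interval_cases g <;> simp [get_round, get_round_alt, get_round_loop] <;> decide
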